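-- pv_equiv track=rewrite | github.com/poleha/py_examples | learn/sporting/slice_game.py | iterate_array
-- ===== SOURCE A (Python) =====
-- def iterate_array(a):
--     l = len(a)
--     for j in range(l): # Первый символ
--         for i in range(1, l + 1- j): # Длина
--             cur = a[j:j + i]
--             if sum(cur) % 2 == 1:
--                 continue
--             left = a[:j] + a[j + i:]
--             if left and sum(left) % 2 == 0:
--                 continue
--             yield (left, i, j)
-- ===== SOURCE B (Python) =====
-- def iterate_array(a):
--     n = len(a)
--     pre = [0]
--     for x in a:
--         pre.append(pre[-1] + x)
--     total = pre[n]
--     for j in range(n):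
--         for i in range(1, n + 1 - j):
--             s = pre[j + i] - pre[j]
--             if s % 2 == 0 and (i == n or (total - s) % 2 == 1):
--                 yield (a[:j] + a[j + i:], i, j)
-- ===== Notes on version B (the rewrite author's own statement) =====
-- stated objective: alternative
-- what changed: B precomputes a prefix-sum list once so each subarray's sum and the complement's sum (total - sum(cur)) are O(1) parity tests, instead of A's fresh sum() over both slices for every (j,i) pair; the complement list is built only when a tuple is actually yielded (intended as faster; measured 1.51x at n=256, unconfirmed at n=1024 where the yielded output itself is cubic-sized).
import Mathlib
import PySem

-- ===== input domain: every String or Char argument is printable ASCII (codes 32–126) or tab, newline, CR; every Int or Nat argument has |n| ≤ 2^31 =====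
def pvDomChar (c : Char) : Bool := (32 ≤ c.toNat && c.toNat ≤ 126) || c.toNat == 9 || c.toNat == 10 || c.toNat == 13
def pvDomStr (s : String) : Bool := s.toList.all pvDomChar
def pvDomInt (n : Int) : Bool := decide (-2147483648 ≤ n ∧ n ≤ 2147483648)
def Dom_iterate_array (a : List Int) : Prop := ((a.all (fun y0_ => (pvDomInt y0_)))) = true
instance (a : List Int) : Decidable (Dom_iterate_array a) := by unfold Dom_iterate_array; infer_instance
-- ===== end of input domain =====

-- B replaces A's per-subarray sum() scans by a prefix-sum list (sum(left) = total - sum(cur)): O(1) parity tests per pair instead of fresh slice sums (alternative algorithm; measured 1.51x at n=256, unconfirmed at larger sizes where output dominates).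

-- ===== PORT A =====
-- literal transliteration of A: nested ranges, slice out cur and left, sum each slice afresh
def iterate_array (a : List Int) : List (List Int × Int × Int) :=
  let l : Int := a.length
  (PySem.List.pyRange 0 l 1).foldl (fun accj j =>
    (PySem.List.pyRange 1 (l + 1 - j) 1).foldl (fun acc i =>
      let cur := PySem.List.slice a (some j) (some (j + i))
      if PySem.Int.mod cur.sum 2 == 1 then acc
      else
        let left := PySem.List.slice a none (some j) ++ PySem.List.slice a (some (j + i)) none
        if !left.isEmpty && (PySem.Int.mod left.sum 2 == 0) then acc
        else acc ++ [(left, i, j)]) accj) []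

-- ===== PORT B =====
-- literal transliteration of B: build prefix sums once, O(1) parity tests, slice only when yielding
def iterate_array_alt (a : List Int) : List (List Int × Int × Int) :=
  let n : Int := a.length
  let pre := a.foldl (fun p x => p ++ [PySem.List.pyGetD p (-1) 0 + x]) [(0 : Int)]
  let total := PySem.List.pyGetD pre n 0
  (PySem.List.pyRange 0 n 1).foldl (fun accj j =>
    (PySem.List.pyRange 1 (n + 1 - j) 1).foldl (fun acc i =>
      let s := PySem.List.pyGetD pre (j + i) 0 - PySem.List.pyGetD pre j 0
      if (PySem.Int.mod s 2 == 0) && ((i == n) || (PySem.Int.mod (total - s) 2 == 1))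
      then acc ++ [(PySem.List.slice a none (some j) ++ PySem.List.slice a (some (j + i)) none, i, j)]
      else acc) accj) []

-- ===== PRECONDITION & SPEC =====
def Spec_iterate_array (a : List Int) (out : List (List Int × Int × Int)) : Prop := out = iterate_array_alt a
instance (a : List Int) (out : List (List Int × Int × Int)) : Decidable (Spec_iterate_array a out) := by unfold Spec_iterate_array; infer_instance

-- ===== CLAIM (what is proved, stated in full; the proofs are below) =====
def Claim_equal_iterate_array : Prop := ∀ (a : List Int), Dom_iterate_array a → Spec_iterate_array a (iterate_array a)

-- ===== LEMMAS AND PROOFS =====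

-- running prefix sums starting from c (exclusive of c itself)
def psums (c : Int) : List Int → List Int
  | [] => []
  | x :: xs => (c + x) :: psums (c + x) xs

theorem foldPre (a : List Int) (p : List Int) (c : Int) :
    a.foldl (fun p x => p ++ [PySem.List.pyGetD p (-1) 0 + x]) (p ++ [c]) = p ++ [c] ++ psums c a := by
  induction a generalizing p c with
  | nil => simp [psums]
  | cons x xs ih =>
    simp only [List.foldl_cons, PySem.List.pyGetD_neg_one_append_singleton]
    have h := ih (p ++ [c]) (c + x)
    simp [psums, List.append_assoc] at h ⊢
    exact h

theorem pre_eq (a : List Int) :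
    a.foldl (fun p x => p ++ [PySem.List.pyGetD p (-1) 0 + x]) [(0 : Int)] = 0 :: psums 0 a := by
  simpa using foldPre a [] 0

theorem psums_getD (a : List Int) (c : Int) (k : Nat) (hk : k ≤ a.length) :
    ((c :: psums c a).getD k 0) = c + (a.take k).sum := by
  induction a generalizing c k with
  | nil =>
    have : k = 0 := by simpa using hk
    subst this; simp
  | cons x xs ih =>
    cases k with
    | zero => simp
    | succ k =>
      have hk' : k ≤ xs.length := by simpa using hk
      have h := ih (c + x) k hk'
      simp only [psums, List.getD_cons_succ, List.take_succ_cons, List.sum_cons] at h ⊢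
      rw [h]; ring

theorem sum_take_add (a : List Int) (j i : Nat) :
    (a.take (j + i)).sum = (a.take j).sum + ((a.drop j).take i).sum := by
  rw [List.take_add]; simp

theorem sum_left (a : List Int) (j i : Nat) :
    (a.take j ++ a.drop (j + i)).sum = a.sum - ((a.drop j).take i).sum := by
  have h1 : (a.take (j + i)).sum + (a.drop (j + i)).sum = a.sum := by
    rw [← List.sum_append, List.take_append_drop]
  have h2 := sum_take_add a j i
  rw [List.sum_append]
  omega

theorem iterate_array_eq (a : List Int) : iterate_array a = iterate_array_alt a := by
  simp only [iterate_array, iterate_array_alt, pre_eq]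
  apply PySem.List.foldl_congr_mem
  intro accj j hj
  rw [PySem.List.mem_pyRange_one] at hj
  apply PySem.List.foldl_congr_mem
  intro acc i hi
  rw [PySem.List.mem_pyRange_one] at hi
  lift j to Nat using hj.1 with jn
  have hi1 : (0 : Int) ≤ i := by omega
  lift i to Nat using hi1 with ni
  have hjlt : jn < a.length := by exact_mod_cast hj.2
  have hin1 : 1 ≤ ni := by exact_mod_cast hi.1
  have hsum : jn + ni ≤ a.length := by
    have := hi.2; push_cast at this; omega
  have hcast : (jn : Int) + (ni : Int) = ((jn + ni : Nat) : Int) := by push_cast; ring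
  rw [hcast, PySem.List.slice_natCast, PySem.List.slice_to_natCast, PySem.List.slice_from_natCast,
    PySem.List.pyGetD_natCast, PySem.List.pyGetD_natCast]
  rw [PySem.List.pyGetD_natCast]
  rw [psums_getD a 0 (jn + ni) hsum, psums_getD a 0 jn (by omega), psums_getD a 0 a.length (le_refl _)]
  have htk : jn + ni - jn = ni := by omega
  rw [htk]
  simp only [zero_add, List.take_length]
  rw [sum_left a jn ni]
  have hdiff : (a.take (jn + ni)).sum - (a.take jn).sum = ((a.drop jn).take ni).sum := by
    rw [sum_take_add]; ring
  rw [hdiff]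
  set S := ((a.drop jn).take ni).sum with hS
  -- emptiness of left ↔ ni = a.length
  have hempty : (a.take jn ++ a.drop (jn + ni)).isEmpty = true ↔ ni = a.length := by
    constructor
    · intro h
      rw [List.isEmpty_iff, List.append_eq_nil_iff] at h
      have h2 := congrArg List.length h.2
      rw [List.length_drop] at h2
      have h3 := congrArg List.length h.1
      rw [List.length_take] at h3
      simp only [List.length_nil] at h2 h3
      omega
    · intro h
      have hz : jn = 0 := by omega
      subst hz
      simp [List.isEmpty_iff, List.drop_eq_nil_iff]
      omega
  clear hS
  clear_value S
  have hdS := Int.emod_two_eq S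
  have hdL := Int.emod_two_eq (a.sum - S)
  by_cases he : ni = a.length
  · have hj0 : jn = 0 := by omega
    by_cases hS2 : S % 2 = 1
    · simp [hS2, he]
    · have hS0 : S % 2 = 0 := by omega
      simp [hS0, he, hj0]
  · have hE : (a.take jn ++ a.drop (jn + ni)).isEmpty = false := by
      cases h : (a.take jn ++ a.drop (jn + ni)).isEmpty
      · rfl
      · exact absurd (hempty.mp h) he
    have hb : ((ni : Int) == ((a.length : Nat) : Int)) = false :=
      beq_eq_false_iff_ne.mpr (by exact_mod_cast he)
    by_cases hS2 : S % 2 = 1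
    · simp [hS2, hb]
    · have hS0 : S % 2 = 0 := by omega
      by_cases hL2 : (a.sum - S) % 2 = 1
      · simp [hS0, hL2, hE, hb]
      · have hL0 : (a.sum - S) % 2 = 0 := by omega
        simp [hS0, hL0, hE, hb]

-- ===== VERDICT (by name: the statement is the Claim_ definition above) =====
theorem iterate_array_spec : Claim_equal_iterate_array := by
  intro a _
  unfold Spec_iterate_array
  exact iterate_array_eq a
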